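-- pv_equiv track=rewrite | github.com/guillaumelf/EPL_TextMining | traitement_nltk.py | remove_useless
-- ===== SOURCE A (Python) =====
-- list_allowed = ['a','b','c','d','e','f','g','h','i','j','k','l','m','n','o','p','q','r','s','t','u','v','w','x','y','z','£','0','1','2','3','4','5','6','7','8','9','10']
--
-- def remove_useless(word):
--     useful = 0
--     letters = list(word)
--     for elem in list_allowed :
--         if elem in letters :
--             useful +=1
--     if useful == 0 :
--         new_word = 'useless'
--     else :
--         new_word = word
--     return new_word
-- ===== SOURCE B (Python) =====
-- def remove_useless(word):
--     for ch in word: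
--         if 'a' <= ch <= 'z' or '0' <= ch <= '9' or ch == '\u00a3':
--             return word
--     return 'useless'
-- ===== Notes on version B (the rewrite author's own statement) =====
-- stated objective: faster
-- what changed: Replaces the scan of the 37-element allowed list (counting which allowed elements occur among the word's letters) with a direct character-class range test (a-z, 0-9, or the pound sign) applied to each character of the word with an early return; no allowed list and no counter exist in B.
import Mathlib
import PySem

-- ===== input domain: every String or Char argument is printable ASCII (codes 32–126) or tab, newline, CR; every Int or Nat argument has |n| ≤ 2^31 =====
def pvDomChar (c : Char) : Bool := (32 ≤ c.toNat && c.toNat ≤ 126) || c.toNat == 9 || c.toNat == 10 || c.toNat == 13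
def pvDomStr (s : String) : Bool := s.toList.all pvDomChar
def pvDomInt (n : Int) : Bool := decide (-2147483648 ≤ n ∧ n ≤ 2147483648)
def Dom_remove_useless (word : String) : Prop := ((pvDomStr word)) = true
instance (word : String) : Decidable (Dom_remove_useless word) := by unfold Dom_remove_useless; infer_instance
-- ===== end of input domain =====

-- B replaces A's count over the 37-element allowed list with a direct character-class
-- range test on the word's own characters, returning early (objective: faster, measured).

-- ===== PORT A =====
-- the module-level list_allowed (elements are Python strings; '10' has two characters)
def pvListAllowed : List String :=
  ["a","b","c","d","e","f","g","h","i","j","k","l","m","n","o","p","q","r","s",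
   "t","u","v","w","x","y","z","£","0","1","2","3","4","5","6","7","8","9","10"]

def remove_useless (word : String) : String :=
  -- useful = 0; letters = list(word) (a list of 1-char strings)
  let letters : List String := word.toList.map (fun c => String.mk [c])
  let useful : Nat := pvListAllowed.foldl (fun u elem => if elem ∈ letters then u + 1 else u) 0
  if useful = 0 then "useless" else word

-- ===== PORT B =====
-- 'a' <= ch <= 'z' or '0' <= ch <= '9' or ch == '£'
def pvAllowedChar (c : Char) : Bool :=
  (decide ('a' ≤ c) && decide (c ≤ 'z')) || (decide ('0' ≤ c) && decide (c ≤ '9')) || (c == '£')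

-- 'for ch in word: if <class test>: return word' as structural recursion
def pvScan : List Char → String → String
  | [], _ => "useless"
  | c :: rest, w => if pvAllowedChar c then w else pvScan rest w

def remove_useless_alt (word : String) : String := pvScan word.toList word

-- ===== PRECONDITION & SPEC =====
def Spec_remove_useless (word : String) (out : String) : Prop := out = remove_useless_alt word
instance (word : String) (out : String) : Decidable (Spec_remove_useless word out) := by unfold Spec_remove_useless; infer_instance

-- ===== CLAIM (what is proved, stated in full; the proofs are below) =====
def Claim_equal_remove_useless : Prop := ∀ (word : String), Dom_remove_useless word → Spec_remove_useless word (remove_useless word)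

-- ===== LEMMAS AND PROOFS =====

-- B's early-return scan returns the word iff some character passes the class test
lemma pvScan_eq (l : List Char) (w : String) :
    pvScan l w = if l.any pvAllowedChar then w else "useless" := by
  induction l with
  | nil => simp [pvScan]
  | cons c rest ih =>
      by_cases h : pvAllowedChar c = true <;> simp [pvScan, h, ih]

-- A's counting foldl computes n + countP
lemma foldl_count_eq {α : Type} (p : α → Prop) [DecidablePred p] (l : List α) (n : Nat) :
    l.foldl (fun u e => if p e then u + 1 else u) n = n + l.countP (fun e => decide (p e)) := by
  induction l generalizing n with
  | nil => simp
  | cons a t ih =>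
      simp only [List.foldl_cons, List.countP_cons, ih]
      by_cases h : p a <;> simp [h] <;> omega

-- over the first 128 code points, the class test agrees with membership in list_allowed
lemma allowed_key : ∀ n : Fin 128,
    pvAllowedChar (Char.ofNat n.val) = decide (String.mk [Char.ofNat n.val] ∈ pvListAllowed) := by
  decide

-- bridge for any character of the input domain
lemma allowed_bridge (c : Char) (hc : pvDomChar c = true) :
    pvAllowedChar c = decide (String.mk [c] ∈ pvListAllowed) := by
  have hlt : c.toNat < 128 := by
    have hc' : ((32 ≤ c.toNat ∧ c.toNat ≤ 126 ∨ c.toNat = 9) ∨ c.toNat = 10) ∨ c.toNat = 13 := by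
      simpa [pvDomChar] using hc
    omega
  have hofs : Char.ofNat c.toNat = c := Char.ofNat_toNat c
  have := allowed_key ⟨c.toNat, hlt⟩
  simpa [hofs] using this

theorem remove_useless_spec : Claim_equal_remove_useless := by
  intro word hdom
  unfold Spec_remove_useless remove_useless remove_useless_alt
  have hdom' : ∀ c ∈ word.toList, pvDomChar c = true := by
    simpa [Dom_remove_useless, pvDomStr, List.all_eq_true] using hdom
  rw [pvScan_eq]
  simp only [foldl_count_eq, Nat.zero_add]
  by_cases h : word.toList.any pvAllowedChar = true
  · -- some character is allowed: A's count is positive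
    rw [if_pos h, if_neg]
    intro h0
    rw [List.countP_eq_zero] at h0
    rw [List.any_eq_true] at h
    obtain ⟨c, hcmem, hcall⟩ := h
    rw [allowed_bridge c (hdom' c hcmem)] at hcall
    simp only [decide_eq_true_eq] at hcall
    have := h0 _ hcall
    simp only [decide_eq_true_eq, List.mem_map, not_exists, not_and] at this
    exact this c hcmem rfl
  · -- no character is allowed: A's count is 0
    rw [if_neg h, if_pos]
    rw [List.countP_eq_zero]
    intro e he
    simp only [decide_eq_true_eq, List.mem_map, not_exists, not_and]
    rintro c hc rfl
    rw [List.any_eq_true] at h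
    push_neg at h
    have := h c hc
    rw [allowed_bridge c (hdom' c hc)] at this
    simp only [ne_eq, decide_eq_true_eq] at this
    exact this he
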